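-- pv_equiv track=rewrite | github.com/LucyyyyyyT/markdown-compiler | markdown_compiler/util/line_functions.py | compile_italic_underscore
-- ===== SOURCE A (Python) =====
-- def compile_italic_underscore(line):
--     result = ""
--     i = 0
--
--     while i < len(line):
--         if line[i:i + 1] == "_" and line.find("_", i + 1) != -1:
--             end = line.find("_", i + 1)
--             result += "<i>" + line[i + 1:end] + "</i>"
--             i = end + 1
--         else:
--             result += line[i]
--             i += 1
--
--     return result
-- ===== SOURCE B (Python) =====
-- def compile_italic_underscore(line):
--     parts = line.split("_")
--     out = [parts[0]]
--     k = 1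
--     while k + 1 < len(parts):
--         out.append("<i>" + parts[k] + "</i>" + parts[k + 1])
--         k += 2
--     if k < len(parts):
--         out.append("_" + parts[k])
--     return "".join(out)
-- ===== Notes on version B (the rewrite author's own statement) =====
-- stated objective: faster
-- what changed: Instead of a char-by-char index scan with repeated str.find and quadratic string concatenation, B splits the line on '_' once and joins consecutive part pairs into <i>..</i> spans (an odd leftover part keeps its underscore), assembling the result with one join.
import Mathlib
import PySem

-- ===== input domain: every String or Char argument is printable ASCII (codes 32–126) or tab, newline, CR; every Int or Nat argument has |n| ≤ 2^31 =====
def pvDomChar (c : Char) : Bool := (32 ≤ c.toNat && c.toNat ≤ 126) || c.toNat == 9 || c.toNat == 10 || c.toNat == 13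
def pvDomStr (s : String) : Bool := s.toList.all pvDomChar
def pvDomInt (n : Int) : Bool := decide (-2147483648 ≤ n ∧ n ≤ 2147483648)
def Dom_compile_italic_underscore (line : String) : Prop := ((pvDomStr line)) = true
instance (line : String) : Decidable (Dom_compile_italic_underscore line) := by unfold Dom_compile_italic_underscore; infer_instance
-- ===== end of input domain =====

-- B replaces A's index scan + repeated find with one split on '_' and a pairwise join (objective: faster, one pass).

-- ===== PORT A =====
-- A's while loop advances i monotonically and only reads line[i:], so it is the
-- obvious structural recursion on the remaining suffix: line[i]='_' with a later
-- '_' consumes up to that match (takeWhile/dropWhile = line[i+1:end] and the rest),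
-- else one character is copied.
def pvGoA : List Char → List Char
  | [] => []
  | c :: rest =>
    if c = '_' ∧ rest.contains '_' then
      "<i>".toList ++ rest.takeWhile (· ≠ '_') ++ "</i>".toList ++
        pvGoA ((rest.dropWhile (· ≠ '_')).tail)
    else c :: pvGoA rest
termination_by l => l.length
decreasing_by
  · simp only [List.length_cons]
    have h1 : ((rest.dropWhile (· ≠ '_')).tail).length ≤ (rest.dropWhile (· ≠ '_')).length := by
      rw [List.length_tail]; omega
    have h2 : (rest.dropWhile (· ≠ '_')).length ≤ rest.length := List.length_dropWhile_le _ _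
    omega
  · simp

def compile_italic_underscore (line : String) : String := String.ofList (pvGoA line.toList)

-- ===== PORT B =====
-- the while loop over parts[k], parts[k+1] pairs (k = 1, 3, …), leftover part kept with its '_'
def pvPairsB : List (List Char) → List Char
  | a :: b :: t => "<i>".toList ++ a ++ "</i>".toList ++ b ++ pvPairsB t
  | [a] => '_' :: a
  | [] => []

def compile_italic_underscore_alt (line : String) : String :=
  match line.toList.splitOn '_' with   -- line.split("_")
  | [] => ""                           -- unreachable: split is never empty
  | p :: rest => String.ofList (p ++ pvPairsB rest)

-- ===== PRECONDITION & SPEC =====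
def Spec_compile_italic_underscore (line : String) (out : String) : Prop := out = compile_italic_underscore_alt line
instance (line : String) (out : String) : Decidable (Spec_compile_italic_underscore line out) := by unfold Spec_compile_italic_underscore; infer_instance

-- ===== CLAIM (what is proved, stated in full; the proofs are below) =====
def Claim_equal_compile_italic_underscore : Prop := ∀ (line : String), Dom_compile_italic_underscore line → Spec_compile_italic_underscore line (compile_italic_underscore line)

-- ===== LEMMAS AND PROOFS =====

def pvJoinP : List (List Char) → List Char
  | [] => []
  | p :: rest => p ++ pvPairsB rest

theorem pvSplitOn_append_cons (m t : List Char) (hm : ∀ x ∈ m, x ≠ '_') :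
    (m ++ '_' :: t).splitOn '_' = m :: t.splitOn '_' := by
  induction m with
  | nil => simp [List.splitOn, List.splitOnP_cons]
  | cons a m' ih =>
    have ha : a ≠ '_' := hm a (by simp)
    have ih' := ih (fun x hx => hm x (List.mem_cons_of_mem _ hx))
    simp only [List.splitOn] at ih' ⊢
    rw [List.cons_append, List.splitOnP_cons, if_neg (by simp [ha]), ih']
    rfl

theorem pvDecomp (l : List Char) (h : '_' ∈ l) :
    l = l.takeWhile (· ≠ '_') ++ '_' :: (l.dropWhile (· ≠ '_')).tail := by
  induction l with
  | nil => cases h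
  | cons a l ih =>
    by_cases ha : a = '_'
    · subst ha; simp
    · have h' : '_' ∈ l := by
        rcases List.mem_cons.mp h with h0 | h0
        · exact absurd h0.symm ha
        · exact h0
      simp only [List.takeWhile_cons, List.dropWhile_cons]
      simpa [ha] using congrArg (a :: ·) (ih h')

theorem pvGoA_eq_joinP (l : List Char) : pvGoA l = pvJoinP (l.splitOn '_') := by
  fun_induction pvGoA l with
  | case1 => simp [pvJoinP, pvPairsB, List.splitOn]
  | case2 c rest hcond ih =>
    obtain ⟨hc, hmem⟩ := hcond
    subst hc
    have hmem' : '_' ∈ rest := by simpa using hmem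
    have hmfree : ∀ x ∈ rest.takeWhile (· ≠ '_'), x ≠ '_' := by
      intro x hx
      simpa using List.mem_takeWhile_imp hx
    have hsp : ('_' :: rest).splitOn '_' =
        [] :: rest.takeWhile (· ≠ '_') :: ((rest.dropWhile (· ≠ '_')).tail).splitOn '_' := by
      rw [show ('_' :: rest).splitOn '_' = [] :: rest.splitOn '_' by
            simp [List.splitOn, List.splitOnP_cons]]
      rw [show rest.splitOn '_' =
            rest.takeWhile (· ≠ '_') :: ((rest.dropWhile (· ≠ '_')).tail).splitOn '_' by
          conv_lhs => rw [pvDecomp rest hmem']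
          exact pvSplitOn_append_cons _ _ hmfree]
    rw [hsp]
    obtain ⟨q, s, hqs⟩ : ∃ q s, (((rest.dropWhile (· ≠ '_')).tail).splitOn '_') = q :: s := by
      cases hqs : ((rest.dropWhile (· ≠ '_')).tail).splitOn '_' with
      | nil => exact absurd hqs (List.splitOnP_ne_nil _ _)
      | cons q s => exact ⟨q, s, rfl⟩
    rw [ih, hqs]
    simp [pvJoinP, pvPairsB]
  | case3 c rest hcond ih =>
    rw [ih]
    by_cases hc : c = '_'
    · subst hc
      have hnotmem : rest.contains '_' = false := by
        cases h : rest.contains '_' with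
        | false => rfl
        | true => exact absurd ⟨rfl, h⟩ hcond
      have hfree : ∀ x ∈ rest, ¬ (x == '_') = true := by
        intro x hx
        simp only [beq_iff_eq]
        intro he; subst he
        rw [List.contains_eq_mem] at hnotmem
        simp [hx] at hnotmem
      rw [show ('_' :: rest).splitOn '_' = [] :: rest.splitOn '_' by
            simp [List.splitOn, List.splitOnP_cons]]
      rw [show rest.splitOn '_' = [rest] from List.splitOnP_eq_single _ _ hfree]
      simp [pvJoinP, pvPairsB]
    · rw [show (c :: rest).splitOn '_' =
            List.modifyHead (List.cons c) (rest.splitOn '_') by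
          simp [List.splitOn, List.splitOnP_cons, hc]]
      obtain ⟨q, s, hqs⟩ : ∃ q s, rest.splitOn '_' = q :: s := by
        cases hqs : rest.splitOn '_' with
        | nil => exact absurd hqs (List.splitOnP_ne_nil _ _)
        | cons q s => exact ⟨q, s, rfl⟩
      rw [hqs]
      simp [pvJoinP]

-- ===== VERDICT (by name: the statement is the Claim_ definition above) =====
theorem compile_italic_underscore_spec : Claim_equal_compile_italic_underscore := by
  intro line _
  unfold Spec_compile_italic_underscore compile_italic_underscore compile_italic_underscore_alt
  rw [pvGoA_eq_joinP]
  cases h : line.toList.splitOn '_' with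
  | nil => exact absurd h (List.splitOnP_ne_nil _ _)
  | cons p rest => simp [pvJoinP]
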